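-- pv_equiv track=rewrite | github.com/udhayprakash/Python_for_interview_preparation | Interview_Questions/WordStringProblems/LexicographicSwapping.py | lexicographicallySmallest
-- ===== SOURCE A (Python) =====
-- def lexicographicallySmallest(S, B):
--     chars = [ch for ch, val in zip(S, B) if val == "1"]
--     chars.sort()
--     result = list(S)
--     for index, ch in enumerate(S):
--         if B[index] == "1":
--             result[index] = chars.pop(0)
--     return "".join(result)
-- ===== SOURCE B (Python) =====
-- def lexicographicallySmallest(S, B):
--     result = list(S)
--     positions = [i for i in range(len(S)) if B[i] == "1"]
--     chars = sorted(result[i] for i in positions)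
--     for i, ch in zip(positions, chars):
--         result[i] = ch
--     return "".join(result)
-- ===== Notes on version B (the rewrite author's own statement) =====
-- stated objective: faster
-- what changed: B builds an explicit index table of the marked positions once, sorts the characters extracted at those indices, and writes them back in a single zip pass, instead of A's scan over every character of S consuming a pop(0) front-queue.
import Mathlib
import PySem

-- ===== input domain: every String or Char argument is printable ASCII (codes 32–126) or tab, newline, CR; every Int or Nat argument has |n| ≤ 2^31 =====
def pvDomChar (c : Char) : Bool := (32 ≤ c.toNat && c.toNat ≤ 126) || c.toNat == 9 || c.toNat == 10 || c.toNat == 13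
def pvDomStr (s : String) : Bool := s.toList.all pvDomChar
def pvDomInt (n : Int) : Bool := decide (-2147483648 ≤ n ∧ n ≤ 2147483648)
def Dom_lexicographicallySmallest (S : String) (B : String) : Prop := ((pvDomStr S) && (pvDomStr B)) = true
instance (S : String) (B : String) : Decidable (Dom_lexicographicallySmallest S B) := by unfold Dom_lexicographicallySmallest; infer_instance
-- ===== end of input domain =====

-- B replaces A's full scan of S with a pop(0) queue by an explicit index table of the
-- marked positions plus one zip pass writing the sorted characters back (alternative decomposition).

-- ===== PORT A =====
-- step of A's 'for index, ch in enumerate(S)' loop; state = (result, chars queue); chars.pop(0) = take head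
def lexAStep (bl : List Char) (st : List Char × List Char) (p : Int × Char) :
    List Char × List Char :=
  if PySem.List.pyGet? bl p.1 == some '1' then
    match st.2 with
    | [] => st
    | c :: rest => (PySem.List.pySetD st.1 p.1 c, rest)
  else st

def lexicographicallySmallest (S : String) (B : String) : String :=
  let sl := S.toList
  let bl := B.toList
  let chars := PySem.List.sorted (((sl.zip bl).filter (fun p => p.2 == '1')).map Prod.fst) id
  let st := (PySem.List.enumerate sl).foldl (lexAStep bl) (sl, chars)
  String.ofList st.1

-- ===== PORT B =====
def lexicographicallySmallest_alt (S : String) (B : String) : String :=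
  let result := S.toList
  let bl := B.toList
  let positions := (PySem.List.pyRange 0 result.length 1).filter
    (fun i => PySem.List.pyGet? bl i == some '1')
  let chars := PySem.List.sorted (positions.map (fun i => PySem.List.pyGetD result i ' ')) id
  String.ofList ((positions.zip chars).foldl (fun r p => PySem.List.pySetD r p.1 p.2) result)

-- ===== PRECONDITION & SPEC =====
-- Pre_ excludes exactly len(S) > len(B), where Python A raises IndexError at B[index]
-- (and Python B raises IndexError in its comprehension too).
def Pre_lexicographicallySmallest (S : String) (B : String) : Prop :=
  S.toList.length ≤ B.toList.length
instance (S : String) (B : String) : Decidable (Pre_lexicographicallySmallest S B) := by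
  unfold Pre_lexicographicallySmallest; infer_instance

def pvWitness_lexicographicallySmallest : String × String := ("dcab", "1101")

def Spec_lexicographicallySmallest (S : String) (B : String) (out : String) : Prop := out = lexicographicallySmallest_alt S B
instance (S : String) (B : String) (out : String) : Decidable (Spec_lexicographicallySmallest S B out) := by unfold Spec_lexicographicallySmallest; infer_instance

-- ===== CLAIM (what is proved, stated in full; the proofs are below) =====
def Claim_equal_lexicographicallySmallest : Prop := ∀ (S : String) (B : String), Dom_lexicographicallySmallest S B → Pre_lexicographicallySmallest S B → Spec_lexicographicallySmallest S B (lexicographicallySmallest S B)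

-- ===== LEMMAS AND PROOFS =====

-- the marked indices, as naturals (proof-side notion)
def lexMarks (n : Nat) (bl : List Char) : List Nat :=
  (List.range n).filter (fun i => bl[i]? == some '1')

-- enumerate is range-zip
theorem lex_enum_eq (sl : List Char) : ∀ (k : Int),
    PySem.List.enumerate sl k
      = ((List.range sl.length).map (fun i : Nat => k + (i : Int))).zip sl := by
  induction sl with
  | nil => intro k; simp [PySem.List.enumerate]
  | cons x t ih =>
    intro k
    have h0 : PySem.List.enumerate (x :: t) k = (k, x) :: PySem.List.enumerate t (k+1) := rfl
    have hl : (List.range (x :: t).length).map (fun i : Nat => k + (i : Int))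
        = k :: (List.range t.length).map (fun i : Nat => (k+1) + (i : Int)) := by
      rw [List.length_cons, List.range_succ_eq_map, List.map_cons, List.map_map]
      congr 1
      · simp
      · apply List.map_congr_left
        intro i _
        simp only [Function.comp_apply, Nat.succ_eq_add_one]
        push_cast; ring
    rw [h0, ih, hl, List.zip_cons_cons]

-- B's position table = lexMarks, cast to Int
theorem lex_positions_eq (n : Nat) (bl : List Char) :
    (PySem.List.pyRange 0 (n : Int) 1).filter (fun i => PySem.List.pyGet? bl i == some '1')
      = (lexMarks n bl).map (fun i : Nat => (i : Int)) := by
  rw [PySem.List.pyRange_zero_natCast n, List.filter_map]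
  unfold lexMarks
  congr 1
  apply List.filter_congr
  intro i _
  simp [PySem.List.pyGet?_natCast]

-- A's extracted characters = characters of S at the marked indices
theorem lex_chars_eq : ∀ (sl bl : List Char), sl.length ≤ bl.length →
    ((sl.zip bl).filter (fun p => p.2 == '1')).map Prod.fst
      = (lexMarks sl.length bl).map (fun i => sl.getD i ' ') := by
  intro sl
  induction sl with
  | nil => intro bl _; simp [lexMarks]
  | cons x t ih =>
    intro bl hb
    cases bl with
    | nil => simp at hb
    | cons y bt =>
      simp only [List.length_cons] at hb
      have ht := ih bt (by omega)
      unfold lexMarks at ht ⊢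
      have hsucc : List.filter (fun i => (y :: bt)[i]? == some '1')
            (List.map Nat.succ (List.range t.length))
          = List.map Nat.succ (List.filter (fun i => bt[i]? == some '1') (List.range t.length)) := by
        simp [List.filter_map, Function.comp_def]
      simp only [List.zip_cons_cons, List.length_cons, List.range_succ_eq_map,
        List.filter_cons, hsucc]
      by_cases hy : y = '1'
      all_goals simp [hy, ht, List.map_map, Function.comp_def]

-- filter on fst then project fst over a zip (lengths compatible)
theorem lex_filter_zip_fst {α β : Type} (p : α → Bool) :
    ∀ (l : List α) (m : List β), l.length ≤ m.length →
    ((l.zip m).filter (fun q => p q.1)).map Prod.fst = l.filter p := by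
  intro l
  induction l with
  | nil => intro m _; simp
  | cons x t ih =>
    intro m hm
    cases m with
    | nil => simp at hm
    | cons y mt =>
      simp only [List.length_cons] at hm
      by_cases hx : p x <;>
        simp [hx, ih mt (by omega)]

-- the central loop lemma: A's queue-consuming fold = one zip pass of assignments
theorem lex_loop_eq (bl : List Char) :
    ∀ (es : List (Int × Char)) (res q : List Char),
    es.foldl (lexAStep bl) (res, q)
      = ((((es.filter (fun p => PySem.List.pyGet? bl p.1 == some '1')).map Prod.fst).zip q).foldl
           (fun r (p : Int × Char) => PySem.List.pySetD r p.1 p.2) res,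
         q.drop ((es.filter (fun p => PySem.List.pyGet? bl p.1 == some '1')).length)) := by
  intro es
  induction es with
  | nil => intro res q; simp
  | cons e t ih =>
    intro res q
    simp only [List.foldl_cons, List.filter_cons]
    by_cases he : (PySem.List.pyGet? bl e.1 == some '1') = true
    · cases q with
      | nil =>
        have hst : lexAStep bl (res, []) e = (res, []) := by simp [lexAStep, he]
        rw [hst, ih res [], if_pos he]
        simp
      | cons c qt =>
        have hst : lexAStep bl (res, c :: qt) e = (PySem.List.pySetD res e.1 c, qt) := by
          simp [lexAStep, he]
        rw [hst, ih (PySem.List.pySetD res e.1 c) qt, if_pos he]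
        simp [List.zip_cons_cons]
    · have hst : lexAStep bl (res, q) e = (res, q) := by simp [lexAStep, he]
      rw [hst, ih res q, if_neg he]

-- ===== VERDICT (by name: the statement is the Claim_ definition above) =====
theorem lexicographicallySmallest_spec : Claim_equal_lexicographicallySmallest := by
  intro S B _ hpre
  unfold Spec_lexicographicallySmallest
  unfold Pre_lexicographicallySmallest at hpre
  simp only [lexicographicallySmallest, lexicographicallySmallest_alt]
  have hpos := lex_positions_eq S.toList.length B.toList
  have hposR : ((List.range S.toList.length).map (fun i : Nat => (i : Int))).filter
        (fun i => PySem.List.pyGet? B.toList i == some '1')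
      = (lexMarks S.toList.length B.toList).map (fun i : Nat => (i : Int)) := by
    rw [← PySem.List.pyRange_zero_natCast]
    exact hpos
  have hchars := lex_chars_eq S.toList B.toList hpre
  have hBchars : ((lexMarks S.toList.length B.toList).map (fun i : Nat => (i : Int))).map
        (fun i => PySem.List.pyGetD S.toList i ' ')
      = (lexMarks S.toList.length B.toList).map (fun i => S.toList.getD i ' ') := by
    rw [List.map_map]
    apply List.map_congr_left
    intro i _
    simp [PySem.List.pyGetD_natCast]
  have henum : PySem.List.enumerate S.toList
      = ((List.range S.toList.length).map (fun i : Nat => (i : Int))).zip S.toList := by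
    rw [lex_enum_eq S.toList 0]
    congr 1
    apply List.map_congr_left
    intro i _
    simp
  have hfz := lex_filter_zip_fst (fun i : Int => PySem.List.pyGet? B.toList i == some '1')
      ((List.range S.toList.length).map (fun i : Nat => (i : Int))) S.toList (by simp)
  have hloop := lex_loop_eq B.toList (PySem.List.enumerate S.toList) S.toList
      (PySem.List.sorted (((S.toList.zip B.toList).filter (fun p => p.2 == '1')).map Prod.fst) id)
  rw [hloop, henum, hfz, hposR, hpos, hchars, hBchars]
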